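-- pv_equiv track=rewrite | github.com/pypi-data/pypi-mirror-371 | packages/BICSdifftest/bicsdifftest-1.0.1-py3-none-any.whl/bicsdifftest/sim/verilator/build_system.py | _parse_dependency_file
-- ===== SOURCE A (Python) =====
-- from typing import Dict, Any, List, Optional, Set, Tuple
--
-- def _parse_dependency_file(content: str) -> Dict[str, List[str]]:
--     """Parse make-style dependency file."""
--     dependencies = {}
--
--     lines = content.split('\n')
--     current_target = None
--     current_deps = []
--
--     for line in lines:
--         line = line.strip()
--         if not line or line.startswith('#'):
--             continue
--
--         if ':' in line and not line.startswith('\t'):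
--             # New target line
--             if current_target:
--                 dependencies[current_target] = current_deps
--
--             parts = line.split(':', 1)
--             current_target = parts[0].strip()
--             deps_part = parts[1].strip()
--
--             if deps_part:
--                 current_deps = [d.strip() for d in deps_part.split() if d.strip()]
--             else:
--                 current_deps = []
--         elif line.startswith('\t') or line.startswith(' '):
--             # Continuation line
--             deps = [d.strip() for d in line.split() if d.strip()]
--             current_deps.extend(deps)
--
--     if current_target:
--         dependencies[current_target] = current_deps
--
--     return dependencies
-- ===== SOURCE B (Python) =====
-- def _parse_dependency_file(content: str):
--     """Parse make-style dependency file: single pass, emit each entry immediately."""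
--     dependencies = {}
--     for raw in content.split('\n'):
--         line = raw.strip()
--         if not line or line.startswith('#'):
--             continue
--         if ':' in line:
--             target, deps = line.split(':', 1)
--             t = target.strip()
--             if t:
--                 dependencies[t] = deps.split()
--     return dependencies
-- ===== Notes on version B (the rewrite author's own statement) =====
-- stated objective: simpler
-- what changed: B replaces A's cross-line state machine (current_target/current_deps accumulated and flushed on the next target line or at EOF, plus an unreachable continuation branch) with a single stateless pass that writes each target's dependency list into the dict immediately, relying on dict last-wins overwrite.
import Mathlib
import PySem

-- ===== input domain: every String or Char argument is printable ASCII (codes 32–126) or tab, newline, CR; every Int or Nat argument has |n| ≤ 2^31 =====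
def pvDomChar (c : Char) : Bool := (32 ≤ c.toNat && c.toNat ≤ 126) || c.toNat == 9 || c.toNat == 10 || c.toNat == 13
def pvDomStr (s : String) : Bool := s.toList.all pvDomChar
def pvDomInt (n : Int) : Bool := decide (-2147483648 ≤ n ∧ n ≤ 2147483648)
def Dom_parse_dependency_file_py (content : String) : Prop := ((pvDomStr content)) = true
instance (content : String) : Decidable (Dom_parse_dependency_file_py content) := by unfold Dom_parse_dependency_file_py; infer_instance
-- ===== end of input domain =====

-- B replaces A's cross-line current_target/current_deps accumulator with a single stateless
-- pass that writes each entry immediately (objective: simpler).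

-- ===== PORT A =====
-- loop body of A's 'for line in lines' (state: dependencies, current_target, current_deps)
def parse_dependency_file_py_step
    (st : PySem.Dict String (List String) × Option String × List String)
    (rawline : String) : PySem.Dict String (List String) × Option String × List String :=
  match st with
  | (dependencies, current_target, current_deps) =>
    let line := PySem.Str.strip rawline
    if line = "" ∨ PySem.Str.startswith line "#" = true then
      (dependencies, current_target, current_deps)
    else if PySem.Str.isIn ":" line = true ∧ PySem.Str.startswith line "\t" = false then
      -- new target line: flush the previous target, then split on the first ':'
      let dependencies' :=
        match current_target with
        | some t => if t = "" then dependencies else dependencies.insert t current_deps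
        | none => dependencies
      let parts := (PySem.Str.splitMax? line ":" 1).getD []   -- ':' is in line, so sep ≠ "" and 2 parts
      let current_target' := PySem.Str.strip (PySem.List.pyGetD parts 0 "")
      let deps_part := PySem.Str.strip (PySem.List.pyGetD parts 1 "")
      let current_deps' :=
        if deps_part = "" then []
        else ((PySem.Str.split₀ deps_part).filter
                (fun d => PySem.Str.strip d ≠ "")).map PySem.Str.strip
      (dependencies', some current_target', current_deps')
    else if PySem.Str.startswith line "\t" = true ∨ PySem.Str.startswith line " " = true then
      -- continuation line
      let deps := ((PySem.Str.split₀ line).filter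
                     (fun d => PySem.Str.strip d ≠ "")).map PySem.Str.strip
      (dependencies, current_target, current_deps ++ deps)
    else
      (dependencies, current_target, current_deps)

def parse_dependency_file_py (content : String) : List (String × List String) :=
  let lines := (PySem.Str.split? content "\n").getD []        -- '\n' ≠ "", always some
  let fin := lines.foldl parse_dependency_file_py_step (PySem.Dict.empty, none, [])
  let dependencies :=
    match fin.2.1 with
    | some t => if t = "" then fin.1 else fin.1.insert t fin.2.2
    | none => fin.1
  dependencies.items

-- ===== PORT B =====
def parse_dependency_file_py_alt (content : String) : List (String × List String) :=
  (((PySem.Str.split? content "\n").getD []).foldl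
    (fun dependencies raw =>
      let line := PySem.Str.strip raw
      if line = "" ∨ PySem.Str.startswith line "#" = true then dependencies
      else if PySem.Str.isIn ":" line = true then
        let parts := (PySem.Str.splitMax? line ":" 1).getD []   -- ':' is in line, so 2 parts
        let t := PySem.Str.strip (PySem.List.pyGetD parts 0 "")
        if t = "" then dependencies
        else dependencies.insert t (PySem.Str.split₀ (PySem.List.pyGetD parts 1 ""))
      else dependencies)
    PySem.Dict.empty).items

-- ===== PRECONDITION & SPEC =====
def Spec_parse_dependency_file_py (content : String) (out : List (String × List String)) : Prop := out = parse_dependency_file_py_alt content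
instance (content : String) (out : List (String × List String)) : Decidable (Spec_parse_dependency_file_py content out) := by unfold Spec_parse_dependency_file_py; infer_instance

-- ===== CLAIM (what is proved, stated in full; the proofs are below) =====
def Claim_equal_parse_dependency_file_py : Prop := ∀ (content : String), Dom_parse_dependency_file_py content → Spec_parse_dependency_file_py content (parse_dependency_file_py content)

-- ===== LEMMAS AND PROOFS =====

-- B's loop body, by name (definitionally the lambda inside parse_dependency_file_py_alt)
def pvStepB (dependencies : PySem.Dict String (List String)) (raw : String) :
    PySem.Dict String (List String) :=
  let line := PySem.Str.strip raw
  if line = "" ∨ PySem.Str.startswith line "#" = true then dependencies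
  else if PySem.Str.isIn ":" line = true then
    let parts := (PySem.Str.splitMax? line ":" 1).getD []
    let t := PySem.Str.strip (PySem.List.pyGetD parts 0 "")
    if t = "" then dependencies
    else dependencies.insert t (PySem.Str.split₀ (PySem.List.pyGetD parts 1 ""))
  else dependencies

-- A's pending write, made explicit
def pvFlush (st : PySem.Dict String (List String) × Option String × List String) :
    PySem.Dict String (List String) :=
  match st.2.1 with
  | some t => if t = "" then st.1 else st.1.insert t st.2.2
  | none => st.1

lemma pv_strip_cons_not_space (s : List Char) (c : Char) (t : List Char)
    (h : PySem.Chars.strip s = c :: t) : PySem.Chars.isspace c = false := by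
  have hpre : PySem.Chars.strip s <+: PySem.Chars.lstrip s := by
    unfold PySem.Chars.strip PySem.Chars.rstrip
    have hsuf := List.dropWhile_suffix (l := (PySem.Chars.lstrip s).reverse) PySem.Chars.isspace
    simpa using hsuf.reverse
  rw [h] at hpre
  obtain ⟨u, hu⟩ := hpre
  have hd : List.dropWhile PySem.Chars.isspace s = c :: (t ++ u) := by
    simpa [PySem.Chars.lstrip] using hu.symm
  have hne : List.dropWhile PySem.Chars.isspace s ≠ [] := by simp [hd]
  have h1 := List.head_dropWhile_not (l := s) PySem.Chars.isspace hne
  have h2 : (List.dropWhile PySem.Chars.isspace s).head hne = c := by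
    simp [hd]
  rwa [h2] at h1

lemma pv_strip_startswith_ws (raw : String) (c : Char) (hc : PySem.Chars.isspace c = true)
    (p : String) (hp : p.toList = [c]) :
    PySem.Str.startswith (PySem.Str.strip raw) p = false := by
  cases hx : PySem.Str.startswith (PySem.Str.strip raw) p
  · rfl
  · exfalso
    rw [PySem.Str.startswith_eq, PySem.Str.toList_strip, hp,
        PySem.Chars.startswith_iff] at hx
    obtain ⟨u, hu⟩ := hx
    have := pv_strip_cons_not_space raw.toList c u hu.symm
    rw [hc] at this
    simp at this

lemma pv_strip_startswith_tab (raw : String) :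
    PySem.Str.startswith (PySem.Str.strip raw) "\t" = false :=
  pv_strip_startswith_ws raw '\t' (by decide) "\t" (by decide)

lemma pv_strip_startswith_space (raw : String) :
    PySem.Str.startswith (PySem.Str.strip raw) " " = false :=
  pv_strip_startswith_ws raw ' ' (by decide) " " (by decide)

lemma pv_go_space_only (ws : List Char) (hws : ∀ c ∈ ws, PySem.Chars.isspace c = true)
    (cur : List Char) (acc : List (List Char)) :
    PySem.Chars.split₀.go ws cur acc = PySem.Chars.split₀.go [] cur acc := by
  induction ws generalizing cur acc with
  | nil => rfl
  | cons c rest ih =>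
    have hc : PySem.Chars.isspace c = true := hws c (by simp)
    have hrest : ∀ x ∈ rest, PySem.Chars.isspace x = true := fun x hx => hws x (by simp [hx])
    by_cases hcur : cur.isEmpty = true
    · rw [show PySem.Chars.split₀.go (c :: rest) cur acc
            = PySem.Chars.split₀.go rest [] acc by simp [PySem.Chars.split₀.go, hc, hcur],
          ih hrest]
      simp [PySem.Chars.split₀.go, hcur]
    · rw [show PySem.Chars.split₀.go (c :: rest) cur acc
            = PySem.Chars.split₀.go rest [] (cur.reverse :: acc) by
            simp [PySem.Chars.split₀.go, hc, hcur],
          ih hrest]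
      simp [PySem.Chars.split₀.go, hcur]

lemma pv_go_append_space (xs ws : List Char) (hws : ∀ c ∈ ws, PySem.Chars.isspace c = true)
    (cur : List Char) (acc : List (List Char)) :
    PySem.Chars.split₀.go (xs ++ ws) cur acc = PySem.Chars.split₀.go xs cur acc := by
  induction xs generalizing cur acc with
  | nil => simpa using pv_go_space_only ws hws cur acc
  | cons c rest ih =>
    by_cases hc : PySem.Chars.isspace c = true
    · by_cases hcur : cur.isEmpty = true
      · simp [PySem.Chars.split₀.go, hc, hcur, ih]
      · simp [PySem.Chars.split₀.go, hc, hcur, ih]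
    · simp at hc
      simp [PySem.Chars.split₀.go, hc, ih]

lemma pv_go_prefix_space (ws xs : List Char) (hws : ∀ c ∈ ws, PySem.Chars.isspace c = true)
    (acc : List (List Char)) :
    PySem.Chars.split₀.go (ws ++ xs) [] acc = PySem.Chars.split₀.go xs [] acc := by
  induction ws with
  | nil => rfl
  | cons c rest ih =>
    have hc : PySem.Chars.isspace c = true := hws c (by simp)
    have hrest : ∀ x ∈ rest, PySem.Chars.isspace x = true := fun x hx => hws x (by simp [hx])
    simp [PySem.Chars.split₀.go, hc, ih hrest]

lemma pv_split₀_strip (s : List Char) :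
    PySem.Chars.split₀ (PySem.Chars.strip s) = PySem.Chars.split₀ s := by
  unfold PySem.Chars.split₀
  have hdecomp2 : PySem.Chars.lstrip s
      = PySem.Chars.strip s
        ++ ((PySem.Chars.lstrip s).reverse.takeWhile PySem.Chars.isspace).reverse := by
    have h1 : PySem.Chars.strip s
        = ((PySem.Chars.lstrip s).reverse.dropWhile PySem.Chars.isspace).reverse := rfl
    have h2 : (PySem.Chars.lstrip s).reverse
        = (PySem.Chars.lstrip s).reverse.takeWhile PySem.Chars.isspace
          ++ (PySem.Chars.lstrip s).reverse.dropWhile PySem.Chars.isspace :=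
      (List.takeWhile_append_dropWhile).symm
    calc PySem.Chars.lstrip s = (PySem.Chars.lstrip s).reverse.reverse := by simp
      _ = ((PySem.Chars.lstrip s).reverse.takeWhile PySem.Chars.isspace
            ++ (PySem.Chars.lstrip s).reverse.dropWhile PySem.Chars.isspace).reverse := by
            rw [← h2]
      _ = _ := by rw [List.reverse_append, ← h1]
  have hdecomp1 : s = s.takeWhile PySem.Chars.isspace
      ++ (PySem.Chars.strip s
          ++ ((PySem.Chars.lstrip s).reverse.takeWhile PySem.Chars.isspace).reverse) := by
    rw [← hdecomp2]; simp [PySem.Chars.lstrip]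
  conv_rhs => rw [hdecomp1]
  rw [pv_go_prefix_space _ _ (fun c hc => List.mem_takeWhile_imp hc)]
  rw [pv_go_append_space _ _ (fun c hc => List.mem_takeWhile_imp (by simpa using hc))]

lemma pv_go_mem (cs : List Char) (cur : List Char) (acc : List (List Char))
    (hcur : ∀ c ∈ cur, PySem.Chars.isspace c = false)
    (hacc : ∀ a ∈ acc, a ≠ [] ∧ ∀ c ∈ a, PySem.Chars.isspace c = false) :
    ∀ d ∈ PySem.Chars.split₀.go cs cur acc, d ≠ [] ∧ ∀ c ∈ d, PySem.Chars.isspace c = false := by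
  induction cs generalizing cur acc with
  | nil =>
    intro d hd
    by_cases hc : cur.isEmpty = true
    · simp only [PySem.Chars.split₀.go, hc, if_pos, List.mem_reverse] at hd
      exact hacc d hd
    · simp only [PySem.Chars.split₀.go, hc, if_neg, Bool.not_eq_true, List.mem_reverse,
        List.mem_cons] at hd
      rcases hd with hd | hd
      · subst hd
        refine ⟨by simpa using hc, fun c hc' => hcur c (by simpa using hc')⟩
      · exact hacc d hd
  | cons c rest ih =>
    by_cases hc : PySem.Chars.isspace c = true
    · by_cases hce : cur.isEmpty = true
      · intro d hd
        simp only [PySem.Chars.split₀.go, hc, hce, if_pos] at hd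
        exact ih [] acc (by simp) hacc d hd
      · intro d hd
        simp only [PySem.Chars.split₀.go, hc, hce, if_pos] at hd
        refine ih [] (cur.reverse :: acc) (by simp) ?_ d hd
        intro a ha
        rcases List.mem_cons.mp ha with ha | ha
        · subst ha
          exact ⟨by simpa using hce, fun x hx => hcur x (by simpa using hx)⟩
        · exact hacc a ha
    · simp only [Bool.not_eq_true] at hc
      intro d hd
      simp only [PySem.Chars.split₀.go, hc] at hd
      refine ih (c :: cur) acc ?_ hacc d hd
      intro x hx
      rcases List.mem_cons.mp hx with hx | hx
      · subst hx; exact hc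
      · exact hcur x hx

lemma pv_split₀_mem (s : List Char) :
    ∀ d ∈ PySem.Chars.split₀ s, d ≠ [] ∧ ∀ c ∈ d, PySem.Chars.isspace c = false :=
  pv_go_mem s [] [] (by simp) (by simp)

lemma pv_dropWhile_eq_self (d : List Char) (h : ∀ c ∈ d, PySem.Chars.isspace c = false) :
    List.dropWhile PySem.Chars.isspace d = d := by
  cases d with
  | nil => rfl
  | cons c t => simp [h c (by simp)]

lemma pv_strip_eq_self (d : List Char) (h : ∀ c ∈ d, PySem.Chars.isspace c = false) :
    PySem.Chars.strip d = d := by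
  unfold PySem.Chars.strip PySem.Chars.lstrip PySem.Chars.rstrip
  rw [pv_dropWhile_eq_self d h, pv_dropWhile_eq_self d.reverse
    (fun c hc => h c (by simpa using hc)), List.reverse_reverse]

lemma pv_strip_ofList (d : List Char) :
    PySem.Str.strip (String.ofList d) = String.ofList (PySem.Chars.strip d) := by
  simp [PySem.Str.strip]

lemma pv_depsEq (x : String) :
    (if PySem.Str.strip x = "" then []
     else ((PySem.Str.split₀ (PySem.Str.strip x)).filter
             (fun d => PySem.Str.strip d ≠ "")).map PySem.Str.strip)
      = PySem.Str.split₀ x := by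
  have hL : PySem.Chars.split₀ (PySem.Chars.strip x.toList) = PySem.Chars.split₀ x.toList :=
    pv_split₀_strip x.toList
  by_cases h : PySem.Str.strip x = ""
  · rw [if_pos h]
    have hnil : PySem.Chars.strip x.toList = [] := by
      have := congrArg String.toList h
      simpa [PySem.Str.strip] using this
    rw [PySem.Str.split₀, ← hL, hnil]
    rfl
  · rw [if_neg h]
    rw [PySem.Str.split₀, PySem.Str.split₀, PySem.Str.toList_strip, hL]
    have hmem := pv_split₀_mem x.toList
    rw [List.filter_eq_self.mpr ?_]
    · rw [List.map_map]
      apply List.map_congr_left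
      intro d hd
      have hd' := hmem d hd
      simp [Function.comp, pv_strip_ofList, pv_strip_eq_self d hd'.2]
    · intro a ha
      obtain ⟨d, hd, rfl⟩ := List.mem_map.mp ha
      have hd' := hmem d hd
      simp only [pv_strip_ofList, pv_strip_eq_self d hd'.2, ne_eq, decide_not]
      simp [hd'.1]

set_option maxHeartbeats 1000000 in
lemma pv_step (st : PySem.Dict String (List String) × Option String × List String)
    (raw : String) :
    pvFlush (parse_dependency_file_py_step st raw) = pvStepB (pvFlush st) raw := by
  obtain ⟨d, ct, cd⟩ := st
  cases ct with
  | none => ?_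
  | some t0 => ?_
  all_goals
  have htab := pv_strip_startswith_tab raw
  have hspc := pv_strip_startswith_space raw
  by_cases h1 : (PySem.Str.strip raw = "" ∨ PySem.Str.startswith (PySem.Str.strip raw) "#" = true)
  · simp only [parse_dependency_file_py_step, pvStepB, if_pos h1]
  · by_cases h2 : PySem.Str.isIn ":" (PySem.Str.strip raw) = true
    · simp only [parse_dependency_file_py_step, pvStepB, if_neg h1,
        if_pos (And.intro h2 htab), if_pos h2]
      rw [pv_depsEq]
      generalize PySem.Str.strip
        (PySem.List.pyGetD ((PySem.Str.splitMax? (PySem.Str.strip raw) ":" 1).getD []) 0 "") = t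
      generalize PySem.Str.split₀
        (PySem.List.pyGetD ((PySem.Str.splitMax? (PySem.Str.strip raw) ":" 1).getD []) 1 "") = ds
      simp only [pvFlush]
    · have h2' : ¬ (PySem.Str.isIn ":" (PySem.Str.strip raw) = true
          ∧ PySem.Str.startswith (PySem.Str.strip raw) "\t" = false) := fun hh => h2 hh.1
      have h3 : ¬ (PySem.Str.startswith (PySem.Str.strip raw) "\t" = true
          ∨ PySem.Str.startswith (PySem.Str.strip raw) " " = true) := by
        rw [htab, hspc]; simp
      simp only [parse_dependency_file_py_step, pvStepB, if_neg h1, if_neg h2',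
        if_neg h2, if_neg h3]

lemma pv_fold (lines : List String)
    (st : PySem.Dict String (List String) × Option String × List String) :
    pvFlush (lines.foldl parse_dependency_file_py_step st) = lines.foldl pvStepB (pvFlush st) := by
  induction lines generalizing st with
  | nil => rfl
  | cons l ls ih =>
    simp only [List.foldl_cons]
    rw [ih, pv_step]

-- ===== VERDICT (by name: the statement is the Claim_ definition above) =====
theorem parse_dependency_file_py_spec : Claim_equal_parse_dependency_file_py := by
  intro content _
  unfold Spec_parse_dependency_file_py
  show (pvFlush (((PySem.Str.split? content "\n").getD []).foldl
          parse_dependency_file_py_step (PySem.Dict.empty, none, []))).items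
        = (((PySem.Str.split? content "\n").getD []).foldl pvStepB PySem.Dict.empty).items
  rw [pv_fold]
  rfl
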